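-- pv_equiv track=rewrite | github.com/GundalaNikhil/DSA | dsa-problems/Strings/solutions/python/STR-013-run-length-decode-cap.py | decode_with_cap
-- ===== SOURCE A (Python) =====
-- def decode_with_cap(s: str, cap: int) -> str:
--     result = []
--     i = 0
--     n = len(s)
--
--     while i < n:
--         # Read character
--         char = s[i]
--         i += 1
--
--         # Read count (digits)
--         count_str = ""
--         while i < n and s[i].isdigit():
--             count_str += s[i]
--             i += 1
--
--         # Decode with cap
--         count = int(count_str) if count_str else 1
--         actual_count = min(count, cap)
--         result.append(char * actual_count)
--
--     return ''.join(result)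
-- ===== SOURCE B (Python) =====
-- import re
--
-- def decode_with_cap(s: str, cap: int) -> str:
--     out = []
--     for ch, digits in re.findall(r'(.)(\d*)', s, re.DOTALL):
--         count = int(digits) if digits else 1
--         out.append(ch * min(count, cap))
--     return ''.join(out)
-- ===== Notes on version B (the rewrite author's own statement) =====
-- stated objective: idiomatic
-- what changed: B replaces A's manual index walk with inner digit-accumulation loop by a one-pass regex tokenization into (char, digits) pairs followed by a separate expansion pass.
import Mathlib
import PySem

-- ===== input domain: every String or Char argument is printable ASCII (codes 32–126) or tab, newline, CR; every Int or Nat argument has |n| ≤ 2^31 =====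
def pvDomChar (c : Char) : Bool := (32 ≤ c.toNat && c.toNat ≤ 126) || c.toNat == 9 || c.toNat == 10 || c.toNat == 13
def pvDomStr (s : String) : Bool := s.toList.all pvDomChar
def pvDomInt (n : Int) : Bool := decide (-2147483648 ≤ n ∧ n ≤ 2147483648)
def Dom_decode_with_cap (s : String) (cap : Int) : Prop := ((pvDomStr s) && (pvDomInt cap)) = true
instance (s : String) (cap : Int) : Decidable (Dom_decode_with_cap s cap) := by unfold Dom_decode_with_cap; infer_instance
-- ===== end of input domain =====

-- B tokenizes with a regex into (char, digits) pairs then expands; A walks an index with an inner digit loop. Same values, idiomatic restructuring.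

-- char * k (Python string repetition; empty for k ≤ 0)
def pvRepeat (c : Char) (k : Int) : String := String.ofList (List.replicate k.toNat c)

-- ===== PORT A =====
-- inner while loop: accumulate digits into count_str, return (count_str, remaining input)
def aDigits : List Char → List Char → List Char × List Char
  | [], acc => (acc, [])
  | c :: rest, acc =>
    if PySem.Chars.isdigit c then aDigits rest (acc ++ [c]) else (acc, c :: rest)

theorem aDigits_eq (l acc : List Char) :
    aDigits l acc = (acc ++ l.takeWhile PySem.Chars.isdigit, l.dropWhile PySem.Chars.isdigit) := by
  induction l generalizing acc with
  | nil => simp [aDigits]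
  | cons c rest ih =>
    by_cases h : PySem.Chars.isdigit c = true <;>
      simp [aDigits, h, List.takeWhile, List.dropWhile, ih]

-- outer while loop of A, accumulating result
def aGo (cap : Int) (l : List Char) (res : List String) : List String :=
  match l with
  | [] => res
  | c :: rest =>
    let p := aDigits rest []
    -- int(count_str) if count_str else 1; count_str is all digits so ofChars? always returns some here
    let count : Int := if p.1 ≠ [] then (PySem.Int.ofChars? p.1).getD 0 else 1
    aGo cap p.2 (res ++ [pvRepeat c (min count cap)])
termination_by l.length
decreasing_by
  simp only [aDigits_eq]
  have := List.length_dropWhile_le (p := PySem.Chars.isdigit) (l := rest)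
  simpa using Nat.lt_succ_of_le this

def decode_with_cap (s : String) (cap : Int) : String :=
  PySem.Str.join "" (aGo cap s.toList [])

-- ===== PORT B =====
-- hand port of re.findall(r'(.)(\d*)', s, re.DOTALL): one char, then a greedy run of digits; exact on the ASCII domain
def bTokenize (l : List Char) : List (Char × List Char) :=
  match l with
  | [] => []
  | c :: rest =>
    let p := rest.span PySem.Chars.isdigit
    (c, p.1) :: bTokenize p.2
termination_by l.length
decreasing_by
  simp only [List.span_eq_takeWhile_dropWhile]
  have := List.length_dropWhile_le (p := PySem.Chars.isdigit) (l := rest)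
  simpa using Nat.lt_succ_of_le this

def bExpand (cap : Int) (t : Char × List Char) : String :=
  let count : Int := if t.2 ≠ [] then (PySem.Int.ofChars? t.2).getD 0 else 1
  pvRepeat t.1 (min count cap)

def decode_with_cap_alt (s : String) (cap : Int) : String :=
  PySem.Str.join "" ((bTokenize s.toList).map (bExpand cap))

-- ===== PRECONDITION & SPEC =====
def Spec_decode_with_cap (s : String) (cap : Int) (out : String) : Prop := out = decode_with_cap_alt s cap
instance (s : String) (cap : Int) (out : String) : Decidable (Spec_decode_with_cap s cap out) := by unfold Spec_decode_with_cap; infer_instance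

-- ===== CLAIM (what is proved, stated in full; the proofs are below) =====
def Claim_equal_decode_with_cap : Prop := ∀ (s : String) (cap : Int), Dom_decode_with_cap s cap → Spec_decode_with_cap s cap (decode_with_cap s cap)

-- ===== LEMMAS AND PROOFS =====
theorem aGo_eq (cap : Int) : ∀ (n : ℕ) (l : List Char), l.length ≤ n → ∀ (res : List String),
    aGo cap l res = res ++ (bTokenize l).map (bExpand cap) := by
  intro n
  induction n with
  | zero =>
    intro l hl res
    have : l = [] := List.eq_nil_of_length_eq_zero (Nat.le_zero.mp hl)
    subst this
    simp [aGo, bTokenize]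
  | succ n ih =>
    intro l hl res
    match l with
    | [] => simp [aGo, bTokenize]
    | c :: rest =>
      rw [aGo, bTokenize]
      simp only [aDigits_eq, List.span_eq_takeWhile_dropWhile, List.nil_append]
      rw [ih _ (le_trans (List.length_dropWhile_le _ _) (Nat.succ_le_succ_iff.mp hl))]
      simp [bExpand, List.append_assoc]

-- ===== VERDICT (by name: the statement is the Claim_ definition above) =====
theorem decode_with_cap_spec : Claim_equal_decode_with_cap := by
  intro s cap _
  unfold Spec_decode_with_cap decode_with_cap decode_with_cap_alt
  rw [aGo_eq cap s.toList.length s.toList le_rfl []]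
  simp
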